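-- pv_equiv track=rewrite | github.com/SonakshiA/Sarcastic-Font-Converter | main.py | convertAlternateCharacters
-- ===== SOURCE A (Python) =====
-- def convertAlternateCharacters(inputString:str):
--     """
--     This function converts every alternate character in a string to uppercase and the remaining characters to lowercase.
--     """
--     outputString = ""
--     for i in range(len(inputString)):
--         if i % 2 == 0:
--             outputString += inputString[i].lower()
--         else:
--             outputString += inputString[i].upper()
--     return outputString
-- ===== SOURCE B (Python) =====
-- def convertAlternateCharacters(inputString: str):
--     # Consume the string two characters at a time via an iterator: no index,
--     # no parity test; collect pieces and join once.
--     pieces = []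
--     it = iter(inputString)
--     for even in it:
--         pieces.append(even.lower())
--         odd = next(it, None)
--         if odd is not None:
--             pieces.append(odd.upper())
--     return ''.join(pieces)
-- ===== Notes on version B (the rewrite author's own statement) =====
-- stated objective: alternative
-- what changed: Replaces the index loop with its per-index parity branch by a pairwise iterator consumption (lower one char, upper the next, no indices or modulus) collected into a list and joined once.
import Mathlib
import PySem

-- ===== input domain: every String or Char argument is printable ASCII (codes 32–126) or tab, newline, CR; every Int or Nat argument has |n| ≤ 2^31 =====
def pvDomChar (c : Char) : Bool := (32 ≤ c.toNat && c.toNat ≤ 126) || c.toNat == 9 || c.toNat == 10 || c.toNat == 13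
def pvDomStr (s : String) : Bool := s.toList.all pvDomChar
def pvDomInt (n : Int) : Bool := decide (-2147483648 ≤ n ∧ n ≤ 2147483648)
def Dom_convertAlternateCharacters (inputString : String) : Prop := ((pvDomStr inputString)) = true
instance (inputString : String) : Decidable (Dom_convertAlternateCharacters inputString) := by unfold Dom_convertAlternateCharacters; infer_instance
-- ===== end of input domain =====

-- B replaces A's index loop and parity branch by pairwise iterator consumption
-- (lower one char, upper the next); alternative decomposition, same result.

-- ===== PORT A =====
-- for i in range(len(s)): if i % 2 == 0: out += s[i].lower() else: out += s[i].upper()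
def convertAlternateCharacters (inputString : String) : String :=
  String.ofList
    ((PySem.List.pyRange 0 (PySem.Str.len inputString) 1).foldl
      (fun acc i =>
        if PySem.Int.mod i 2 == 0 then
          acc ++ PySem.Chars.lower [PySem.List.pyGetD inputString.toList i ' ']
        else
          acc ++ PySem.Chars.upper [PySem.List.pyGetD inputString.toList i ' '])
      [])

-- ===== PORT B =====
-- pairwise consumption: lower the first of each pair, upper the second
def altPairs : List Char → List Char
  | [] => []
  | [a] => [PySem.Chars.lowerChar a]
  | a :: b :: t => PySem.Chars.lowerChar a :: PySem.Chars.upperChar b :: altPairs t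

def convertAlternateCharacters_alt (inputString : String) : String :=
  String.ofList (altPairs inputString.toList)

-- ===== PRECONDITION & SPEC =====
def Spec_convertAlternateCharacters (inputString : String) (out : String) : Prop := out = convertAlternateCharacters_alt inputString
instance (inputString : String) (out : String) : Decidable (Spec_convertAlternateCharacters inputString out) := by unfold Spec_convertAlternateCharacters; infer_instance

-- ===== CLAIM (what is proved, stated in full; the proofs are below) =====
def Claim_equal_convertAlternateCharacters : Prop := ∀ (inputString : String), Dom_convertAlternateCharacters inputString → Spec_convertAlternateCharacters inputString (convertAlternateCharacters inputString)

-- ===== LEMMAS AND PROOFS =====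

-- the result of A's loop, characterised by the starting index parity
def altFrom (k : Nat) : List Char → List Char
  | [] => []
  | c :: t => (if k % 2 = 0 then PySem.Chars.lowerChar c else PySem.Chars.upperChar c) :: altFrom (k + 1) t

lemma rangeFold (xs : List Char) : ∀ (k : Nat) (acc : List Char),
    (List.range xs.length).foldl
      (fun acc j =>
        if (k + j) % 2 = 0 then acc ++ [PySem.Chars.lowerChar (xs.getD j ' ')]
        else acc ++ [PySem.Chars.upperChar (xs.getD j ' ')]) acc
    = acc ++ altFrom k xs := by
  induction xs with
  | nil => intro k acc; simp [altFrom]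
  | cons c t ih =>
    intro k acc
    rw [List.length_cons, List.range_succ_eq_map, List.foldl_cons, List.foldl_map]
    simp only [Nat.add_zero, List.getD_cons_zero, List.getD_cons_succ]
    have hsh : ∀ (a : List Char) (j : Nat),
        (if (k + (j + 1)) % 2 = 0 then a ++ [PySem.Chars.lowerChar (t.getD j ' ')]
         else a ++ [PySem.Chars.upperChar (t.getD j ' ')])
        = (if ((k + 1) + j) % 2 = 0 then a ++ [PySem.Chars.lowerChar (t.getD j ' ')]
           else a ++ [PySem.Chars.upperChar (t.getD j ' ')]) := by
      intro a j; have : k + (j + 1) = (k + 1) + j := by omega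
      rw [this]
    simp only [hsh]
    rw [ih (k + 1)]
    by_cases hk : k % 2 = 0 <;> simp [hk, altFrom]

lemma altFrom_even (t : List Char) : ∀ (k : Nat), k % 2 = 0 → altPairs t = altFrom k t := by
  induction t using altPairs.induct with
  | case1 => intro k _; simp [altPairs, altFrom]
  | case2 a => intro k hk; simp [altPairs, altFrom, hk]
  | case3 a b t ih =>
    intro k hk
    have h1 : (k + 1) % 2 ≠ 0 := by omega
    simp only [altPairs, altFrom, hk, if_pos, h1, List.cons.injEq, true_and]
    exact ⟨rfl, ih (k + 2) (by omega)⟩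

-- ===== VERDICT (by name: the statement is the Claim_ definition above) =====
theorem convertAlternateCharacters_spec : Claim_equal_convertAlternateCharacters := by
  intro s _
  unfold Spec_convertAlternateCharacters convertAlternateCharacters convertAlternateCharacters_alt
  congr 1
  rw [altFrom_even s.toList 0 (by decide)]
  have hlen : PySem.Str.len s = (s.toList.length : Int) := by
    simp [pysem, String.length_toList]
  rw [hlen, PySem.List.pyRange_one, List.foldl_map]
  rw [show ((s.toList.length : Int) - 0).toNat = s.toList.length by simp]
  have hstep : ∀ (acc : List Char) (j : Nat),
      (fun acc (i : Int) =>
        if PySem.Int.mod i 2 == 0 then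
          acc ++ PySem.Chars.lower [PySem.List.pyGetD s.toList i ' ']
        else
          acc ++ PySem.Chars.upper [PySem.List.pyGetD s.toList i ' ']) acc ((0 : Int) + j)
      = (if (0 + j) % 2 = 0 then acc ++ [PySem.Chars.lowerChar (s.toList.getD j ' ')]
         else acc ++ [PySem.Chars.upperChar (s.toList.getD j ' ')]) := by
    intro acc j
    have h2 : ((2 : Int) ∣ (j : Int)) ↔ j % 2 = 0 := by omega
    simp [PySem.List.pyGetD_natCast, PySem.Chars.lower, PySem.Chars.upper, h2]
  simp only [hstep]
  exact rangeFold s.toList 0 []
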